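-- pv_equiv track=rewrite | github.com/OpenCPLC/Forge | opencplc/utils/text.py | line_add_before
-- ===== SOURCE A (Python) =====
-- def line_add_before(text:str, phrase:str, new_line:str, limit:int=1) -> str:
--   """Add line before lines containing phrase."""
--   lines = text.splitlines()
--   out, count = [], 0
--   for ln in lines:
--     if phrase in ln and count < limit:
--       out.append(new_line)
--       count += 1
--     out.append(ln)
--   return "\n".join(out)
-- ===== SOURCE B (Python) =====
-- def line_add_before(text: str, phrase: str, new_line: str, limit: int = 1) -> str:
--   """Add line before lines containing phrase."""
--   lines = text.splitlines()
--   idxs = [i for i, ln in enumerate(lines) if phrase in ln][:max(limit, 0)]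
--   for i in reversed(idxs):
--     lines.insert(i, new_line)
--   return "\n".join(lines)
-- ===== Notes on version B (the rewrite author's own statement) =====
-- stated objective: alternative
-- what changed: Replaces A's single pass with an accumulator list and match counter by a two-phase plan: collect the first max(limit,0) matching line indices, then insert new_line at those positions in reverse order and join.
import Mathlib
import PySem

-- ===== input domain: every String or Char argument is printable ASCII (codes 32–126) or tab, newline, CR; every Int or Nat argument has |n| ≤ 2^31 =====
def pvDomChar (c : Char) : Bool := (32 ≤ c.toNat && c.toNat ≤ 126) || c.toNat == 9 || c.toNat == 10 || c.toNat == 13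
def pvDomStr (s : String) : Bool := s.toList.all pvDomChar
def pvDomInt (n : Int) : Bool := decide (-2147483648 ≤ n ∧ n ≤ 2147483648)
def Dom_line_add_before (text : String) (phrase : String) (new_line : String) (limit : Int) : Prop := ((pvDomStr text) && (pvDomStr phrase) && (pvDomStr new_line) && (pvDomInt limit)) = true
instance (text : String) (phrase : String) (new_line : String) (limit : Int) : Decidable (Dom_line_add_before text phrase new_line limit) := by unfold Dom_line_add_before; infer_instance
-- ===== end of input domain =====

-- B replaces A's single counting pass by an index-collection pass plus reverse-order insertions (alternative decomposition, same cost).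

-- ===== PORT A =====
def line_add_before (text : String) (phrase : String) (new_line : String) (limit : Int) : String :=
  let lines := PySem.Str.splitlines text
  let st := lines.foldl
    (fun (s : List String × Int) ln =>
      if PySem.Str.isIn phrase ln && decide (s.2 < limit)
      then (s.1 ++ [new_line] ++ [ln], s.2 + 1)
      else (s.1 ++ [ln], s.2)) ([], 0)
  PySem.Str.join "\n" st.1

-- ===== PORT B =====
-- the comprehension '[i for i, ln in enumerate(lines) if phrase in ln]' as an offset-carrying recursion
def matchIdxs (phrase : String) (i : Nat) : List String → List Nat
  | [] => []
  | ln :: t => if PySem.Str.isIn phrase ln then i :: matchIdxs phrase (i + 1) t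
               else matchIdxs phrase (i + 1) t

def line_add_before_alt (text : String) (phrase : String) (new_line : String) (limit : Int) : String :=
  let lines := PySem.Str.splitlines text
  let idxs := (matchIdxs phrase 0 lines).take (max limit 0).toNat
  let lines2 := idxs.reverse.foldl (fun ls (i : Nat) => PySem.List.insert ls (i : Int) new_line) lines
  PySem.Str.join "\n" lines2

-- ===== PRECONDITION & SPEC =====
def Spec_line_add_before (text : String) (phrase : String) (new_line : String) (limit : Int) (out : String) : Prop := out = line_add_before_alt text phrase new_line limit
instance (text : String) (phrase : String) (new_line : String) (limit : Int) (out : String) : Decidable (Spec_line_add_before text phrase new_line limit out) := by unfold Spec_line_add_before; infer_instance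

-- ===== CLAIM (what is proved, stated in full; the proofs are below) =====
def Claim_equal_line_add_before : Prop := ∀ (text : String) (phrase : String) (new_line : String) (limit : Int), Dom_line_add_before text phrase new_line limit → Spec_line_add_before text phrase new_line limit (line_add_before text phrase new_line limit)

-- ===== LEMMAS AND PROOFS =====

-- reference result: insert new_line before each matching line while budget k > 0
def goNat (phrase new_line : String) : List String → Nat → List String
  | [], _ => []
  | ln :: t, k =>
    if PySem.Str.isIn phrase ln then
      match k with
      | 0 => ln :: goNat phrase new_line t 0
      | Nat.succ j => new_line :: ln :: goNat phrase new_line t j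
    else ln :: goNat phrase new_line t k

theorem goNat_zero (phrase new_line : String) (t : List String) :
    goNat phrase new_line t 0 = t := by
  induction t with
  | nil => rfl
  | cons ln t ih =>
    by_cases h : PySem.Str.isIn phrase ln = true
    · simp only [goNat, if_pos h, ih]
    · simp only [goNat, if_neg h, ih]

theorem foldA (phrase new_line : String) (limit : Int) :
    ∀ (lines out : List String) (c : Int),
      (lines.foldl
        (fun (s : List String × Int) ln =>
          if PySem.Str.isIn phrase ln && decide (s.2 < limit)
          then (s.1 ++ [new_line] ++ [ln], s.2 + 1)
          else (s.1 ++ [ln], s.2)) (out, c)).1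
      = out ++ goNat phrase new_line lines (limit - c).toNat := by
  intro lines
  induction lines with
  | nil => intro out c; simp [goNat]
  | cons ln t ih =>
    intro out c
    by_cases h : PySem.Str.isIn phrase ln = true
    · by_cases hc : c < limit
      · have hk : (limit - c).toNat = (limit - (c + 1)).toNat + 1 := by omega
        simp only [List.foldl_cons, h, hc, decide_true, Bool.and_self, if_true, ih, hk, goNat,
          if_pos h]
        simp
      · have hk : (limit - c).toNat = 0 := by omega
        simp only [List.foldl_cons, h, hc, decide_false, Bool.and_false,
          Bool.false_eq_true, if_false, ih, hk, goNat, if_pos h]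
        simp [goNat_zero]
    · simp only [Bool.not_eq_true] at h
      simp only [List.foldl_cons, h, Bool.false_and, Bool.false_eq_true, if_false, ih, goNat]
      simp

theorem matchIdxs_shift (phrase : String) :
    ∀ (t : List String) (i : Nat),
      matchIdxs phrase (i + 1) t = (matchIdxs phrase i t).map (· + 1) := by
  intro t
  induction t with
  | nil => intro i; rfl
  | cons ln t ih =>
    intro i
    by_cases h : PySem.Str.isIn phrase ln = true
    · simp only [matchIdxs, if_pos h, ih, List.map_cons]
    · simp only [matchIdxs, if_neg h, ih]

theorem matchIdxs_lt (phrase : String) :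
    ∀ (t : List String) (i m : Nat), m ∈ matchIdxs phrase i t → m < i + t.length := by
  intro t
  induction t with
  | nil => intro i m hm; simp [matchIdxs] at hm
  | cons ln t ih =>
    intro i m hm
    by_cases h : PySem.Str.isIn phrase ln = true
    · simp only [matchIdxs, if_pos h, List.mem_cons] at hm
      rcases hm with rfl | hm
      · simp only [List.length_cons]; omega
      · have := ih (i + 1) m hm; simp only [List.length_cons]; omega
    · simp only [matchIdxs, if_neg h] at hm
      have := ih (i + 1) m hm; simp only [List.length_cons]; omega

theorem insShift (new_line : String) :
    ∀ (M : List Nat) (a : String) (l : List String), (∀ m ∈ M, m ≤ l.length) →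
      (M.map (· + 1)).foldl (fun ls (i : Nat) => PySem.List.insert ls (i : Int) new_line) (a :: l)
      = a :: M.foldl (fun ls (i : Nat) => PySem.List.insert ls (i : Int) new_line) l := by
  intro M
  induction M with
  | nil => intro a l _; rfl
  | cons m M ih =>
    intro a l hM
    have hm : m ≤ l.length := hM m (List.mem_cons_self ..)
    simp only [List.map_cons, List.foldl_cons]
    have h1 : PySem.List.insert (a :: l) (((m + 1 : Nat) : Int)) new_line
        = a :: PySem.List.insert l ((m : Nat) : Int) new_line := by
      rw [PySem.List.insert_natCast (a :: l) (m + 1) new_line (by simp only [List.length_cons]; omega),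
        PySem.List.insert_natCast l m new_line hm]
      simp only [List.take_succ_cons, List.drop_succ_cons, List.cons_append]
    have hlen : (PySem.List.insert l ((m : Nat) : Int) new_line).length = l.length + 1 := by
      rw [PySem.List.insert_natCast l m new_line hm]
      simp only [List.length_append, List.length_take, List.length_cons, List.length_drop]
      omega
    rw [h1, ih a (PySem.List.insert l ((m : Nat) : Int) new_line) ?_]
    · intro x hx
      rw [hlen]
      exact Nat.le_succ_of_le (hM x (List.mem_cons_of_mem _ hx))

theorem foldB (phrase new_line : String) :
    ∀ (t : List String) (k : Nat),
      ((matchIdxs phrase 0 t).take k).reverse.foldl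
        (fun ls (i : Nat) => PySem.List.insert ls (i : Int) new_line) t
      = goNat phrase new_line t k := by
  intro t
  induction t with
  | nil => intro k; simp [matchIdxs, goNat]
  | cons ln t ih =>
    intro k
    have hsh : matchIdxs phrase 1 t = (matchIdxs phrase 0 t).map (· + 1) := by
      simpa using matchIdxs_shift phrase t 0
    have hb : ∀ j, ∀ m ∈ ((matchIdxs phrase 0 t).take j).reverse, m ≤ t.length := by
      intro j m hm
      rw [List.mem_reverse] at hm
      have := matchIdxs_lt phrase t 0 m (List.mem_of_mem_take hm)
      omega
    by_cases h : PySem.Str.isIn phrase ln = true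
    · cases k with
      | zero =>
        simp only [List.take_zero, List.reverse_nil, List.foldl_nil, goNat, if_pos h,
          goNat_zero]
      | succ j =>
        simp only [matchIdxs, if_pos h, hsh, List.take_succ_cons, List.reverse_cons,
          ← List.map_take, ← List.map_reverse, List.foldl_append, List.foldl_cons,
          List.foldl_nil]
        rw [insShift new_line _ _ _ (hb j)]
        have hz : ((0 : Nat) : Int) = 0 := rfl
        rw [hz, PySem.List.insert_zero]
        simp only [goNat, if_pos h, ih j]
    · simp only [matchIdxs, if_neg h, hsh, ← List.map_take, ← List.map_reverse]
      rw [insShift new_line _ _ _ (hb k)]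
      simp only [goNat, if_neg h, ih k]

-- ===== VERDICT (by name: the statement is the Claim_ definition above) =====
theorem line_add_before_spec : Claim_equal_line_add_before := by
  intro text phrase new_line limit _
  unfold Spec_line_add_before line_add_before line_add_before_alt
  have hA := foldA phrase new_line limit (PySem.Str.splitlines text) [] 0
  have hB := foldB phrase new_line (PySem.Str.splitlines text) (max limit 0).toNat
  have hk : (limit - 0).toNat = (max limit 0).toNat := by omega
  simp only [hA, hk, List.nil_append, hB]
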